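-- pv_equiv track=rewrite | github.com/unwisegeek/stream-stopwatch | ssw.py | convert_timefmt
-- ===== SOURCE A (Python) =====
-- def convert_timefmt(time):
--     new_str = ""
--     for n in range(0, len(time)):
--         if time[n] == "M" or time[n] == "S":
--             new_str += "{}"
--         else:
--             new_str += time[n]
--     return new_str
-- ===== SOURCE B (Python) =====
-- def convert_timefmt(time):
--     return time.replace("M", "{}").replace("S", "{}")
-- ===== Notes on version B (the rewrite author's own statement) =====
-- stated objective: faster
-- what changed: Replaces the explicit per-character index loop with branches and string concatenation by two staged whole-string substitution passes (str.replace for 'M', then for 'S'), each a single C-level library pass; correct because the replacement '{}' contains neither replaced character.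
import Mathlib
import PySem

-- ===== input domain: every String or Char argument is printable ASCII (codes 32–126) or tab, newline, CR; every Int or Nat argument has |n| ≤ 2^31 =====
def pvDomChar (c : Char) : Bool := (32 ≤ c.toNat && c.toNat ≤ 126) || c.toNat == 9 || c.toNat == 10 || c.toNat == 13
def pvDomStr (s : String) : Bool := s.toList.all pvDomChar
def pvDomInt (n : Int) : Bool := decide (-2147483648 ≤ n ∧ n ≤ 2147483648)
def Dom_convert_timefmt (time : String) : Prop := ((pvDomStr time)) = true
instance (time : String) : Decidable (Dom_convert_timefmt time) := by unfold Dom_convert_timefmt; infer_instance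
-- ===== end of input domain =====

-- B replaces A's per-character index loop with branches by two staged whole-string substitution
-- passes (str.replace for 'M', then for 'S'); correct because '{}' contains neither 'M' nor 'S'.

-- ===== PORT A =====
-- index loop over range(0, len(time)), appending "{}" or the character itself
def convert_timefmt (time : String) : String :=
  String.mk ((PySem.List.pyRange 0 (time.toList.length : Int) 1).foldl
    (fun acc n =>
      if PySem.List.pyGetD time.toList n ' ' = 'M' ∨ PySem.List.pyGetD time.toList n ' ' = 'S'
      then acc ++ ['{', '}']
      else acc ++ [PySem.List.pyGetD time.toList n ' ']) [])

-- ===== PORT B =====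
-- time.replace("M", "{}").replace("S", "{}")
def convert_timefmt_alt (time : String) : String :=
  PySem.Str.replace (PySem.Str.replace time "M" "{}") "S" "{}"

-- ===== PRECONDITION & SPEC =====
def Spec_convert_timefmt (time : String) (out : String) : Prop := out = convert_timefmt_alt time
instance (time : String) (out : String) : Decidable (Spec_convert_timefmt time out) := by unfold Spec_convert_timefmt; infer_instance

-- ===== CLAIM (what is proved, stated in full; the proofs are below) =====
def Claim_equal_convert_timefmt : Prop := ∀ (time : String), Dom_convert_timefmt time → Spec_convert_timefmt time (convert_timefmt time)

-- ===== LEMMAS AND PROOFS =====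

-- replace.go for a single-character pattern is a per-character flatMap
theorem replace_go_single (m : Char) (new : List Char) :
    ∀ (l : List Char) (fuel : Nat) (acc : List Char), l.length ≤ fuel →
      PySem.Chars.replace.go [m] new fuel l acc
        = acc.reverse ++ l.flatMap (fun c => if c = m then new else [c]) := by
  intro l
  induction l with
  | nil =>
      intro fuel acc _
      cases fuel <;> simp [PySem.Chars.replace.go]
  | cons c t ih =>
      intro fuel acc hle
      cases fuel with
      | zero => simp at hle
      | succ fuel =>
        by_cases h : c = m
        · subst h
          simp [PySem.Chars.replace.go, List.isPrefixOf,
            ih fuel (new.reverse ++ acc) (by simpa using Nat.le_of_succ_le_succ hle)]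
        · have hb : (m == c) = false := by simp [Ne.symm h]
          simp [PySem.Chars.replace.go, List.isPrefixOf, hb, h,
            ih fuel (c :: acc) (by simpa using Nat.le_of_succ_le_succ hle)]

-- Chars.replace with a single-character pattern, closed form
theorem replace_single (m : Char) (new : List Char) (l : List Char) :
    PySem.Chars.replace l [m] new = l.flatMap (fun c => if c = m then new else [c]) := by
  simpa using replace_go_single m new l l.length [] (le_refl _)

-- ===== VERDICT (by name: the statement is the Claim_ definition above) =====
theorem convert_timefmt_spec : Claim_equal_convert_timefmt := by
  intro time _
  unfold Spec_convert_timefmt convert_timefmt convert_timefmt_alt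
  rw [PySem.List.foldl_pyRange_zero_pyGetD' time.toList ' '
    (fun acc c => if c = 'M' ∨ c = 'S' then acc ++ ['{', '}'] else acc ++ [c]) []]
  have hfun : (fun (acc : List Char) c =>
      if c = 'M' ∨ c = 'S' then acc ++ ['{', '}'] else acc ++ [c])
      = (fun acc c => acc ++ (if c = 'M' ∨ c = 'S' then ['{', '}'] else [c])) := by
    funext acc c; split <;> rfl
  rw [hfun]
  have hA := PySem.List.foldl_append_eq_flatMap
    (l := time.toList) (g := fun c => if c = 'M' ∨ c = 'S' then ['{', '}'] else [c])
    (acc := ([] : List Char))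
  simp only [List.nil_append] at hA
  rw [hA]
  simp only [PySem.Str.replace]
  rw [show ("M" : String).toList = ['M'] from rfl, show ("S" : String).toList = ['S'] from rfl,
      show ("{}" : String).toList = ['{', '}'] from rfl]
  have h1 : (String.ofList (PySem.Chars.replace time.toList ['M'] ['{', '}'])).toList
      = PySem.Chars.replace time.toList ['M'] ['{', '}'] := by
    exact String.toList_ofList
  rw [replace_single, h1, replace_single, List.flatMap_assoc]
  have hc : (fun c => List.flatMap (fun c => if c = 'S' then ['{', '}'] else [c])
        (if c = 'M' then ['{', '}'] else [c]))
      = (fun c => if c = 'M' ∨ c = 'S' then ['{', '}'] else [c]) := by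
    funext c
    by_cases hM : c = 'M'
    · subst hM; decide
    · by_cases hS : c = 'S'
      · subst hS; decide
      · simp [hM, hS]
  rw [hc]
  rfl
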